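-- pv_equiv track=rewrite | github.com/fcostin/d_separation | partition.py | gen_binary_partitions
-- ===== SOURCE A (Python) =====
-- def gen_binary_partitions(a):
--     if not a:
--         yield [[], []]
--     else:
--         head, tail = a[0], a[1:]
--         for u, v in gen_binary_partitions(tail):
--             yield [[head] + u, v]
--             yield [u, [head] + v]
-- ===== SOURCE B (Python) =====
-- def gen_binary_partitions(a):
--     n = len(a)
--     for mask in range(2 ** n - 1, -1, -1):
--         left = [a[i] for i in range(n) if (mask >> i) & 1]
--         right = [a[i] for i in range(n) if not (mask >> i) & 1]
--         yield [left, right]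
-- ===== Notes on version B (the rewrite author's own statement) =====
-- stated objective: alternative
-- what changed: Replaces the head/tail recursive generator by a flat loop over descending integer bitmasks, building each left/right part directly from the mask bits.
import Mathlib
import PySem

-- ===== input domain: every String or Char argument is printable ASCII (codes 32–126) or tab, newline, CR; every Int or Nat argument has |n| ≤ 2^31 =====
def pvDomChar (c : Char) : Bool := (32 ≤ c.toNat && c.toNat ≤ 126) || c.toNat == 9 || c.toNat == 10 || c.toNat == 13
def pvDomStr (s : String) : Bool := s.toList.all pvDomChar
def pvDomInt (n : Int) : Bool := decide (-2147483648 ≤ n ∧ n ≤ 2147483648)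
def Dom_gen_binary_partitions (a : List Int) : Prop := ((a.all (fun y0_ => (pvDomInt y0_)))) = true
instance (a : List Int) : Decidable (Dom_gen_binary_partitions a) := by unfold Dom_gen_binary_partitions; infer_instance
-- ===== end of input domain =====

-- B enumerates the same binary partitions by a flat descending-bitmask loop instead of A's
-- head/tail recursion (alternative decomposition, same asymptotic cost).

-- ===== PORT A =====
def gen_binary_partitions (a : List Int) : List (List (List Int)) :=
  match a with
  | [] => [[[], []]]
  | head :: tail =>
    (gen_binary_partitions tail).flatMap (fun p =>
      match p with
      | [u, v] => [[head :: u, v], [u, head :: v]]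
      | _ => [])

-- ===== PORT B =====
def gen_binary_partitions_alt (a : List Int) : List (List (List Int)) :=
  let n := a.length
  ((List.range (2 ^ n)).reverse).map (fun mask =>
    [(List.range n).filterMap (fun i => if Nat.testBit mask i then a[i]? else none),
     (List.range n).filterMap (fun i => if !(Nat.testBit mask i) then a[i]? else none)])

-- ===== PRECONDITION & SPEC =====
def Spec_gen_binary_partitions (a : List Int) (out : List (List (List Int))) : Prop := out = gen_binary_partitions_alt a
instance (a : List Int) (out : List (List (List Int))) : Decidable (Spec_gen_binary_partitions a out) := by unfold Spec_gen_binary_partitions; infer_instance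

-- ===== CLAIM (what is proved, stated in full; the proofs are below) =====
def Claim_equal_gen_binary_partitions : Prop := ∀ (a : List Int), Dom_gen_binary_partitions a → Spec_gen_binary_partitions a (gen_binary_partitions a)

-- ===== LEMMAS AND PROOFS =====

-- the descending mask list over n+1 bits splits into (odd, even) pairs over the n-bit masks
lemma rev_range_double (k : Nat) :
    (List.range (2 * k)).reverse = (List.range k).reverse.flatMap (fun m => [2 * m + 1, 2 * m]) := by
  induction k with
  | zero => simp
  | succ k ih =>
    have h2 : 2 * (k + 1) = 2 * k + 1 + 1 := by ring
    simp [h2, List.range_succ, ih]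

-- one step of B's "left" comprehension: bit 0 decides the head, the rest is the tail at mask/2
lemma left_cons (h : Int) (t : List Int) (mask : Nat) :
    (List.range (t.length + 1)).filterMap
        (fun i => if Nat.testBit mask i then (h :: t)[i]? else none)
      = (if Nat.testBit mask 0 then [h] else [])
        ++ (List.range t.length).filterMap
            (fun i => if Nat.testBit (mask / 2) i then t[i]? else none) := by
  rw [List.range_succ_eq_map, List.filterMap_cons]
  by_cases hb : Nat.testBit mask 0 = true <;>
    simp [hb, List.filterMap_map, Function.comp, Nat.testBit_succ]

-- same for the "right" comprehension (negated bit test)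
lemma right_cons (h : Int) (t : List Int) (mask : Nat) :
    (List.range (t.length + 1)).filterMap
        (fun i => if !(Nat.testBit mask i) then (h :: t)[i]? else none)
      = (if !(Nat.testBit mask 0) then [h] else [])
        ++ (List.range t.length).filterMap
            (fun i => if !(Nat.testBit (mask / 2) i) then t[i]? else none) := by
  rw [List.range_succ_eq_map, List.filterMap_cons]
  by_cases hb : Nat.testBit mask 0 = true <;>
    simp [hb, List.filterMap_map, Function.comp, Nat.testBit_succ]

lemma main_eq (a : List Int) : gen_binary_partitions a = gen_binary_partitions_alt a := by
  induction a with
  | nil => rfl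
  | cons h t ih =>
    rw [gen_binary_partitions, ih]
    unfold gen_binary_partitions_alt
    simp only [List.length_cons, pow_succ, mul_comm ((2:Nat) ^ t.length) 2,
      rev_range_double, List.map_flatMap, List.flatMap_map]
    apply List.flatMap_congr
    intro m _
    have hb1 : Nat.testBit (2 * m + 1) 0 = true := by
      rw [Nat.testBit_zero]; simp
    have hb0 : Nat.testBit (2 * m) 0 = false := by
      rw [Nat.testBit_zero]; simp [Nat.mul_mod_right]
    have hd1 : (2 * m + 1) / 2 = m := by omega
    have hd0 : (2 * m) / 2 = m := by omega
    simp only [List.map_cons, List.map_nil,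
      left_cons, right_cons, hb1, hb0, hd1, hd0]
    simp

-- ===== VERDICT (by name: the statement is the Claim_ definition above) =====
theorem gen_binary_partitions_spec : Claim_equal_gen_binary_partitions := by
  intro a _
  unfold Spec_gen_binary_partitions
  exact main_eq a
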